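-- pv_equiv track=rewrite | github.com/pirekupcode/vartable | vartable/types.py | catMaybes
-- ===== SOURCE A (Python) =====
-- from typing import Union, NamedTuple, List, Dict, Tuple, Callable, TypeVar, Iterator, Optional, Callable, Iterable, Sequence
--
-- T = TypeVar('T')
--
-- def catMaybes(xs: List[Optional[T]]) -> Optional[List[T]]:
--     res: List[T] = []
--     for x in xs:
--         if x is not None:
--             res.append(x)
--         else:
--             return None
--     return res
-- ===== SOURCE B (Python) =====
-- from typing import List, Optional, TypeVar
--
-- T = TypeVar('T')
--
-- def catMaybes(xs: List[Optional[T]]) -> Optional[List[T]]: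
--     # Divide and conquer: split in half, solve each half, combine.
--     if not xs:
--         return []
--     if len(xs) == 1:
--         return None if xs[0] is None else [xs[0]]
--     mid = len(xs) // 2
--     left = catMaybes(xs[:mid])
--     if left is None:
--         return None
--     right = catMaybes(xs[mid:])
--     if right is None:
--         return None
--     return left + right
-- ===== Notes on version B (the rewrite author's own statement) =====
-- stated objective: alternative
-- what changed: Replaces A's single accumulate-with-early-return loop by a divide-and-conquer recursion that splits the list in half, solves each half independently, and concatenates the results (None propagates from either half).
import Mathlib
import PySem

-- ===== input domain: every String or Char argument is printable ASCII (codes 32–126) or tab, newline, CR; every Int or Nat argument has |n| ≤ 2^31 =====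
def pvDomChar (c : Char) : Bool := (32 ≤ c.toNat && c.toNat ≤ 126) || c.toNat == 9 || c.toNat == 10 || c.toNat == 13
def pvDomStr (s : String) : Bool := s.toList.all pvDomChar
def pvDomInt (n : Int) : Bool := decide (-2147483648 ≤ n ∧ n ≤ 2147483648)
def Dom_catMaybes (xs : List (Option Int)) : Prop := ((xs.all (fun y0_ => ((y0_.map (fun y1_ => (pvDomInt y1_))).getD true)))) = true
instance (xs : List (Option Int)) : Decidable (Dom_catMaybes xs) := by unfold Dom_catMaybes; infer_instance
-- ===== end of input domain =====

-- B replaces A's accumulate-with-early-return loop by a divide-and-conquer recursion on the two halves of the list (alternative decomposition; return-value equivalence).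

-- ===== PORT A =====
-- loop over xs carrying the accumulator res; on None, early return None
def catMaybesLoop (res : List Int) : List (Option Int) → Option (List Int)
  | [] => some res
  | x :: rest =>
    match x with
    | some v => catMaybesLoop (res ++ [v]) rest
    | none => none

def catMaybes (xs : List (Option Int)) : Option (List Int) :=
  catMaybesLoop [] xs

-- ===== PORT B =====
-- divide and conquer: base cases for length 0/1, otherwise split at len//2,
-- recurse on each half (xs[:mid] = take mid, xs[mid:] = drop mid), combine with ++
def catMaybes_alt : List (Option Int) → Option (List Int)
  | [] => some []
  | [none] => none
  | [some v] => some [v]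
  | x :: y :: rest =>
    let xs := x :: y :: rest
    let mid := xs.length / 2
    match catMaybes_alt (xs.take mid) with
    | none => none
    | some l =>
      match catMaybes_alt (xs.drop mid) with
      | none => none
      | some r => some (l ++ r)
termination_by xs => xs.length
decreasing_by
  · simp; omega
  · simp; omega

-- ===== PRECONDITION & SPEC =====
def Spec_catMaybes (xs : List (Option Int)) (out : Option (List Int)) : Prop := out = catMaybes_alt xs
instance (xs : List (Option Int)) (out : Option (List Int)) : Decidable (Spec_catMaybes xs out) := by unfold Spec_catMaybes; infer_instance

-- ===== CLAIM (what is proved, stated in full; the proofs are below) =====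
def Claim_equal_catMaybes : Prop := ∀ (xs : List (Option Int)), Dom_catMaybes xs → Spec_catMaybes xs (catMaybes xs)

-- ===== LEMMAS AND PROOFS =====
-- A's loop computes: none iff some element is none, else all the values appended to res.
theorem catMaybesLoop_eq (xs : List (Option Int)) : ∀ (res : List Int),
    catMaybesLoop res xs =
      (if xs.any (fun x => x.isNone) then none else some (res ++ xs.filterMap id)) := by
  induction xs with
  | nil => intro res; simp [catMaybesLoop]
  | cons x rest ih =>
    intro res
    cases x with
    | none => simp [catMaybesLoop]
    | some v =>
      simp only [catMaybesLoop, ih, List.any_cons, List.filterMap_cons]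
      by_cases h : rest.any (fun x => x.isNone) <;> simp [h]

-- B's divide-and-conquer computes the same characterisation, by strong induction on length.
theorem catMaybes_alt_eq : ∀ (n : Nat) (xs : List (Option Int)), xs.length ≤ n →
    catMaybes_alt xs =
      (if xs.any (fun x => x.isNone) then none else some (xs.filterMap id)) := by
  intro n
  induction n with
  | zero =>
    intro xs h
    have : xs = [] := List.eq_nil_of_length_eq_zero (Nat.le_zero.mp h)
    subst this; simp [catMaybes_alt]
  | succ n ih =>
    intro xs h
    match xs with
    | [] => simp [catMaybes_alt]
    | [none] => simp [catMaybes_alt]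
    | [some v] => simp [catMaybes_alt]
    | x :: y :: rest =>
      have hlen : (x :: y :: rest).length = rest.length + 2 := by simp
      set xs' := x :: y :: rest with hxs
      have hmid : xs'.length / 2 < xs'.length := by simp [hxs]; omega
      have ht : (xs'.take (xs'.length / 2)).length ≤ n := by
        simp [hxs] at h ⊢; omega
      have hd : (xs'.drop (xs'.length / 2)).length ≤ n := by
        simp [hxs] at h ⊢; omega
      have hT := ih _ ht
      have hD := ih _ hd
      have hsplit : xs'.take (xs'.length / 2) ++ xs'.drop (xs'.length / 2) = xs' :=
        List.take_append_drop _ _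
      rw [show catMaybes_alt xs' =
          (match catMaybes_alt (xs'.take (xs'.length / 2)) with
           | none => none
           | some l =>
             match catMaybes_alt (xs'.drop (xs'.length / 2)) with
             | none => none
             | some r => some (l ++ r)) from by
        conv_lhs => rw [hxs, catMaybes_alt]]
      rw [hT, hD]
      have hany : xs'.any (fun x => x.isNone) =
          ((xs'.take (xs'.length / 2)).any (fun x => x.isNone)
            || (xs'.drop (xs'.length / 2)).any (fun x => x.isNone)) := by
        conv_lhs => rw [← hsplit]
        rw [List.any_append]
      have hfm : xs'.filterMap (fun x => x) =
          (xs'.take (xs'.length / 2)).filterMap (fun x => x)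
            ++ (xs'.drop (xs'.length / 2)).filterMap (fun x => x) := by
        conv_lhs => rw [← hsplit]
        rw [List.filterMap_append]
      by_cases h1 : (xs'.take (xs'.length / 2)).any (fun x => x.isNone) <;>
        by_cases h2 : (xs'.drop (xs'.length / 2)).any (fun x => x.isNone) <;>
          simp [h1, h2, hany, hfm]

-- ===== VERDICT (by name: the statement is the Claim_ definition above) =====
theorem catMaybes_spec : Claim_equal_catMaybes := by
  intro xs _
  unfold Spec_catMaybes catMaybes
  rw [catMaybesLoop_eq, catMaybes_alt_eq xs.length xs le_rfl]
  simp
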